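-- pv_equiv track=rewrite | github.com/XuanZzz/foobar | level 1/prime.py | answer
-- ===== SOURCE A (Python) =====
-- from math import sqrt
--
-- def answer(n):
--     p = "2357111317192329"
--     for i in range(31, 30000):
--         if len(p) > n + 5:
--             return p[n:n+5]
--         isPrime = True
--         for j in range(2, int(sqrt(i))+1):
--             if i % j == 0:
--                 isPrime = False
--                 break
--         if isPrime:
--             p += str(i)
--     return p[n:n+5]
-- ===== SOURCE B (Python) =====
-- def answer(n):
--     primes = [2]
--     for i in range(3, 30000, 2):
--         is_p = True
--         for p in primes:
--             if p * p > i: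
--                 break
--             if i % p == 0:
--                 is_p = False
--                 break
--         if is_p:
--             primes.append(i)
--     s = "".join(map(str, primes))
--     return s[n:n+5]
-- ===== Notes on version B (the rewrite author's own statement) =====
-- stated objective: faster
-- what changed: A trial-divides every candidate by every integer up to sqrt(i) and grows a string with an early-exit check; B keeps a list of the primes found so far, tests only odd candidates by dividing only by primes p with p*p <= i, and joins the prime list once at the end.
-- outside the precondition, e.g. on answer(-6): A returns '19232', B returns '32998'
import Mathlib
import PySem

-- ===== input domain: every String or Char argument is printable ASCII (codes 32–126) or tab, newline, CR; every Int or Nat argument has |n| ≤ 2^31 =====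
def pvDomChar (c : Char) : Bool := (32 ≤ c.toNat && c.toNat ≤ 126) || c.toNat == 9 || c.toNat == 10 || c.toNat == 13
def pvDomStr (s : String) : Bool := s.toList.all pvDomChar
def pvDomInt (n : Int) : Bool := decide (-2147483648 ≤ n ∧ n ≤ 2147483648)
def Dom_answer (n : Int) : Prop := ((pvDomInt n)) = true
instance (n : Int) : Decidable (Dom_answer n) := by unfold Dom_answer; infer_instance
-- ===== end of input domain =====

-- B replaces A's per-candidate trial division by every integer up to sqrt(i) with a
-- maintained prime list (odd candidates only, divide by primes p while p*p ≤ i);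
-- measurably faster by a constant factor at large n. Equivalence is for n ≥ 0 (Pre_).

-- ===== PORT A =====
-- inner `for j in range(2, int(sqrt(i))+1): if i % j == 0: …break` loop
def pvTrialA (i : Int) : List Int → Bool
  | [] => true
  | j :: rest => if PySem.Int.mod i j == 0 then false else pvTrialA i rest

-- `int(sqrt(i))`: math.sqrt is exact (= the integer square root) for 0 ≤ i < 30000;
-- ported as a fuel-based integer square root (pvIsqrt m = Nat.sqrt m, proved below)
def pvSqrtFuel : Nat → Nat → Nat
  | 0, _ => 0
  | fuel + 1, n =>
    if n < 2 then n
    else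
      let r := 2 * pvSqrtFuel fuel (n / 4)
      if (r + 1) * (r + 1) ≤ n then r + 1 else r

def pvIsqrt (n : Nat) : Nat := pvSqrtFuel n n

def pvIsPrimeA (i : Int) : Bool :=
  pvTrialA i (PySem.List.pyRange 2 ((pvIsqrt i.toNat : Int) + 1) 1)

-- the main `for i in range(31, 30000)` loop with its early `return p[n:n+5]`
def pvGoA : List Int → String → Int → String
  | [], p, n => PySem.Str.slice p (some n) (some (n + 5))
  | i :: rest, p, n =>
    if PySem.Str.len p > n + 5 then PySem.Str.slice p (some n) (some (n + 5))
    else pvGoA rest (if pvIsPrimeA i then p ++ PySem.Int.toStr i else p) n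

def answer (n : Int) : String :=
  pvGoA (PySem.List.pyRange 31 30000 1) "2357111317192329" n

-- ===== PORT B =====
-- inner `for p in primes: if p*p > i: break; if i % p == 0: …break` loop
def pvCheckB (i : Int) : List Int → Bool
  | [] => true
  | p :: rest =>
    if p * p > i then true
    else if PySem.Int.mod i p == 0 then false
    else pvCheckB i rest

def answer_alt (n : Int) : String :=
  let primes := (PySem.List.pyRange 3 30000 2).foldl
    (fun ps i => if pvCheckB i ps then ps ++ [i] else ps) [2]
  let s := PySem.Str.join "" (primes.map PySem.Int.toStr)
  PySem.Str.slice s (some n) (some (n + 5))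

-- ===== PRECONDITION & SPEC =====
-- Pre_ excludes negative n, on which both slices of the differently grown strings are
-- accidental: A slices its short seed string from the right, B slices the full concatenation.
def Pre_answer (n : Int) : Prop := 0 ≤ n
instance (n : Int) : Decidable (Pre_answer n) := by unfold Pre_answer; infer_instance
def pvWitness_answer : Int := (7)

def Spec_answer (n : Int) (out : String) : Prop := out = answer_alt n
instance (n : Int) (out : String) : Decidable (Spec_answer n out) := by unfold Spec_answer; infer_instance

-- ===== CLAIM (what is proved, stated in full; the proofs are below) =====
def Claim_equal_answer : Prop := ∀ (n : Int), Dom_answer n → Pre_answer n → Spec_answer n (answer n)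

-- ===== LEMMAS AND PROOFS =====

-- chars of str(i)
def pvChunk (i : Int) : List Char := (PySem.Int.toStr i).toList

-- the characters A's loop appends while scanning l (no early exit)
def pvTail (l : List Int) : List Char := (l.filter pvIsPrimeA).flatMap pvChunk

-- the primes in [2, m), in increasing order
def pvPrimesBelow (m : Int) : List Int :=
  (PySem.List.pyRange 2 m 1).filter (fun x => decide (Nat.Prime x.toNat))

-- B's fold step
def pvStepB (ps : List Int) (i : Int) : List Int :=
  if pvCheckB i ps then ps ++ [i] else ps

-- slicing [n:n+5] does not look past position n+5
theorem pv_slice_prefix (xs ys : List Char) (n : Int) (h0 : 0 ≤ n)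
    (h : n + 5 < (xs.length : Int)) :
    PySem.List.slice xs (some n) (some (n + 5)) =
      PySem.List.slice (xs ++ ys) (some n) (some (n + 5)) := by
  rw [PySem.List.slice_toNat xs h0 (by omega), PySem.List.slice_toNat (xs ++ ys) h0 (by omega)]
  rw [List.drop_append_of_le_length (by omega)]
  rw [List.take_append_of_le_length (by simp [List.length_drop]; omega)]

-- invariant of A's loop
theorem pvGoA_eq (n : Int) (h0 : 0 ≤ n) :
    ∀ (l : List Int) (p : String),
      (pvGoA l p n).toList =
        PySem.List.slice (p.toList ++ pvTail l) (some n) (some (n + 5)) := by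
  intro l
  induction l with
  | nil =>
    intro p
    simp [pvGoA, pvTail, PySem.Str.toList_slice, PySem.Chars.slice_eq_listSlice]
  | cons i rest ih =>
    intro p
    simp only [pvGoA]
    split
    · next hlen =>
      rw [PySem.Str.toList_slice, PySem.Chars.slice_eq_listSlice]
      apply pv_slice_prefix
      · exact h0
      · rw [PySem.Str.len_eq] at hlen; omega
    · rw [ih]
      congr 1
      by_cases hp : pvIsPrimeA i
      · simp [hp, pvTail, String.toList_append, pvChunk]
      · simp [hp, pvTail]

-- the fuel-based square root is Nat.sqrt
theorem pvSqrtFuel_eq (fuel : Nat) : ∀ n : Nat, n ≤ fuel → pvSqrtFuel fuel n = Nat.sqrt n := by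
  induction fuel with
  | zero => intro n hn; interval_cases n; simp [pvSqrtFuel]
  | succ fuel ih =>
    intro n hn
    rw [pvSqrtFuel]
    by_cases h2 : n < 2
    · rw [if_pos h2]
      interval_cases n <;> simp
    · rw [if_neg h2]
      have hfd : n / 4 ≤ fuel := by omega
      have hr := ih (n / 4) hfd
      set r := 2 * pvSqrtFuel fuel (n / 4) with hrdef
      have h1 : r * r ≤ n := by
        have := Nat.sqrt_le (n / 4)
        have h4 : 4 * (n / 4) ≤ n := by omega
        calc r * r = 4 * (Nat.sqrt (n/4) * Nat.sqrt (n/4)) := by rw [hrdef, hr]; ring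
        _ ≤ 4 * (n / 4) := by omega
        _ ≤ n := h4
      have h2' : n < (r + 2) * (r + 2) := by
        have := Nat.lt_succ_sqrt (n / 4)
        simp only [Nat.succ_eq_add_one] at this
        have h4 : n < 4 * (n / 4) + 4 := by omega
        calc n < 4 * (n / 4) + 4 := h4
        _ ≤ 4 * ((Nat.sqrt (n/4) + 1) * (Nat.sqrt (n/4) + 1)) := by omega
        _ = (r + 2) * (r + 2) := by rw [hrdef, hr]; ring
      by_cases hc : (r + 1) * (r + 1) ≤ n
      · rw [if_pos hc]
        refine le_antisymm (Nat.le_sqrt.mpr hc) ?_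
        have : Nat.sqrt n < r + 2 := Nat.sqrt_lt.mpr h2'
        omega
      · rw [if_neg hc]
        refine le_antisymm (Nat.le_sqrt.mpr h1) ?_
        have hlt : n < (r + 1) * (r + 1) := by omega
        have : Nat.sqrt n < r + 1 := Nat.sqrt_lt.mpr hlt
        omega

theorem pvIsqrt_eq (n : Nat) : pvIsqrt n = Nat.sqrt n := pvSqrtFuel_eq n n le_rfl

-- trial division tests every j in the list
theorem pvTrialA_iff (i : Int) (l : List Int) :
    pvTrialA i l = true ↔ ∀ j ∈ l, ¬ j ∣ i := by
  induction l with
  | nil => simp [pvTrialA]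
  | cons j rest ih =>
    simp only [pvTrialA, List.forall_mem_cons]
    by_cases h : PySem.Int.mod i j = 0
    · have : j ∣ i := (PySem.Int.mod_eq_zero_iff_dvd i j).mp h
      simp [h, this]
    · have : ¬ j ∣ i := fun hd => h ((PySem.Int.mod_eq_zero_iff_dvd i j).mpr hd)
      simp [h, ih, this]

-- A's primality test is primality
theorem pvIsPrimeA_iff (i : Int) (h2 : 2 ≤ i) :
    pvIsPrimeA i = true ↔ Nat.Prime i.toNat := by
  have hi : ((i.toNat : Int)) = i := Int.toNat_of_nonneg (by omega)
  rw [pvIsPrimeA, pvIsqrt_eq, pvTrialA_iff, Nat.prime_def_le_sqrt]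
  constructor
  · intro h
    refine ⟨by omega, fun m h2m hm hdvd => ?_⟩
    refine h (m : Int) ?_ ?_
    · rw [PySem.List.mem_pyRange_one]; constructor
      · exact_mod_cast h2m
      · have : (m : Int) ≤ ((Nat.sqrt i.toNat : Nat) : Int) := by exact_mod_cast hm
        omega
    · rw [← hi]
      exact_mod_cast hdvd
  · rintro ⟨-, h⟩ j hj hdvd
    rw [PySem.List.mem_pyRange_one] at hj
    have hj0 : 0 ≤ j := by omega
    refine h j.toNat ?_ ?_ ?_
    · omega
    · omega
    · have : (j.toNat : Int) ∣ (i.toNat : Int) := by rw [hi, Int.toNat_of_nonneg hj0]; exact hdvd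
      exact_mod_cast this

-- B's check over a sorted list of numbers ≥ 2
theorem pvCheckB_iff (i : Int) :
    ∀ (ps : List Int), List.Pairwise (· < ·) ps → (∀ p ∈ ps, 2 ≤ p) →
      (pvCheckB i ps = true ↔ ∀ p ∈ ps, p * p ≤ i → ¬ p ∣ i) := by
  intro ps
  induction ps with
  | nil => simp [pvCheckB]
  | cons p rest ih =>
    intro hpw hge
    have hp2 : 2 ≤ p := hge p (by simp)
    have hrest : ∀ q ∈ rest, 2 ≤ q := fun q hq => hge q (by simp [hq])
    simp only [pvCheckB, List.forall_mem_cons]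
    split
    · next hgt =>
      simp only [true_iff]
      constructor
      · intro hle; omega
      · intro q hq _
        have hpq : p < q := (List.pairwise_cons.mp hpw).1 q hq
        exfalso
        have : q * q > i := by nlinarith
        omega
    · next hle =>
      by_cases hmod : PySem.Int.mod i p = 0
      · have hdvd : p ∣ i := (PySem.Int.mod_eq_zero_iff_dvd i p).mp hmod
        simp only [hmod]
        simp
        intro h
        exact absurd hdvd (h (by omega))
      · have hnd : ¬ p ∣ i := fun hd => hmod ((PySem.Int.mod_eq_zero_iff_dvd i p).mpr hd)
        have := ih (List.pairwise_cons.mp hpw).2 hrest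
        simp [hmod, this, hnd]

theorem pvPB_mem {m p : Int} : p ∈ pvPrimesBelow m ↔ (2 ≤ p ∧ p < m) ∧ Nat.Prime p.toNat := by
  simp [pvPrimesBelow, List.mem_filter, PySem.List.mem_pyRange_one, and_assoc]

theorem pvPB_pairwise (m : Int) : List.Pairwise (· < ·) (pvPrimesBelow m) := by
  exact List.Pairwise.filter _ (PySem.List.pairwise_lt_pyRange_one 2 m)

-- dividing by the primes below i decides primality of i
theorem pv_check_prime (i : Int) (h3 : 3 ≤ i) :
    (∀ p ∈ pvPrimesBelow i, p * p ≤ i → ¬ p ∣ i) ↔ Nat.Prime i.toNat := by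
  have hi : ((i.toNat : Int)) = i := Int.toNat_of_nonneg (by omega)
  constructor
  · intro h
    by_contra hnp
    set q := (i.toNat).minFac with hq
    have hqp : Nat.Prime q := Nat.minFac_prime (by omega)
    have hqd : q ∣ i.toNat := Nat.minFac_dvd _
    have hq2 : 2 ≤ q := hqp.two_le
    have hqsq : q * q ≤ i.toNat := by
      have := Nat.minFac_sq_le_self (n := i.toNat) (by omega) hnp
      nlinarith [this, sq_nonneg q]
    have hqlt : q < i.toNat := by nlinarith
    have hmem : (q : Int) ∈ pvPrimesBelow i := by
      rw [pvPB_mem]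
      refine ⟨⟨by exact_mod_cast hq2, by omega⟩, by simpa using hqp⟩
    refine h (q : Int) hmem ?_ ?_
    · have : ((q * q : Nat) : Int) ≤ ((i.toNat : Nat) : Int) := by exact_mod_cast hqsq
      push_cast at this; omega
    · rw [← hi]; exact_mod_cast hqd
  · intro hp p hmem hsq
    rw [pvPB_mem] at hmem
    obtain ⟨⟨hp2, hplt⟩, hpp⟩ := hmem
    intro hdvd
    have hdn : p.toNat ∣ i.toNat := by
      have : ((p.toNat : Int)) ∣ ((i.toNat : Int)) := by
        rw [hi, Int.toNat_of_nonneg (by omega : (0:Int) ≤ p)]; exact hdvd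
      exact_mod_cast this
    rcases (Nat.Prime.eq_one_or_self_of_dvd hp _ hdn) with h1 | h2
    · omega
    · omega

-- one step of B's fold at an odd candidate i
theorem pvStepB_eq (i : Int) (h3 : 3 ≤ i) (hodd : 2 ∣ i - 3) :
    pvStepB (pvPrimesBelow i) i = pvPrimesBelow (i + 2) := by
  have hsplit : PySem.List.pyRange 2 (i + 2) 1 =
      PySem.List.pyRange 2 i 1 ++ (PySem.List.pyRange i (i + 1) 1 ++ PySem.List.pyRange (i + 1) (i + 2) 1) := by
    rw [← PySem.List.pyRange_one_append i (i+1) (i+2) (by omega) (by omega),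
        ← PySem.List.pyRange_one_append 2 i (i+2) (by omega) (by omega)]
  have hi1 : PySem.List.pyRange i (i + 1) 1 = [i] := PySem.List.pyRange_one_singleton i
  have hi2 : PySem.List.pyRange (i + 1) (i + 2) 1 = [i + 1] := by
    have := PySem.List.pyRange_one_singleton (i + 1)
    simpa [add_assoc] using this
  have hnot : ¬ Nat.Prime (i + 1).toNat := by
    intro hpr
    have h2d : 2 ∣ (i + 1).toNat := by
      obtain ⟨k, hk⟩ := hodd
      have : i + 1 = 2 * (k + 2) := by omega
      have : (i+1).toNat = 2 * (k+2).toNat := by omega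
      exact ⟨(k+2).toNat, this⟩
    have := (Nat.Prime.eq_one_or_self_of_dvd hpr 2 h2d)
    omega
  have hcheck : pvCheckB i (pvPrimesBelow i) = true ↔ Nat.Prime i.toNat := by
    rw [pvCheckB_iff i (pvPrimesBelow i) (pvPB_pairwise i)
        (fun p hp => ((pvPB_mem.mp hp).1).1)]
    exact pv_check_prime i h3
  have hRHS : pvPrimesBelow (i + 2) = pvPrimesBelow i ++
      (List.filter (fun x => decide (Nat.Prime x.toNat)) [i] ++
       List.filter (fun x => decide (Nat.Prime x.toNat)) [i + 1]) := by
    unfold pvPrimesBelow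
    rw [hsplit, List.filter_append, List.filter_append]
    rw [hi1, hi2]
  rw [hRHS]
  unfold pvStepB
  by_cases hpr : Nat.Prime i.toNat
  · rw [if_pos (hcheck.mpr hpr)]
    simp [List.filter, hpr, hnot]
  · rw [if_neg (by simp [hcheck, hpr])]
    simp [List.filter, hpr, hnot]

-- B's whole fold
theorem pvFoldB_eq :
    (PySem.List.pyRange 3 30000 2).foldl pvStepB [2] = pvPrimesBelow 30001 := by
  have key : ∀ m : Nat,
      ((List.range m).map (fun (k : Nat) => (3 : Int) + 2 * (k : Int))).foldl pvStepB [2] =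
        pvPrimesBelow (3 + 2 * (m : Int)) := by
    intro m
    induction m with
    | zero =>
      have h23 : PySem.List.pyRange 2 3 1 = [2] := by
        have := PySem.List.pyRange_one_singleton (2 : Int)
        norm_num at this ⊢
        exact this
      simp [pvPrimesBelow, h23, List.filter, Nat.prime_two]
    | succ m ih =>
      rw [List.range_succ, List.map_append, List.foldl_append, ih]
      simp only [List.map_cons, List.map_nil, List.foldl_cons, List.foldl_nil]
      rw [pvStepB_eq (3 + 2 * (m : Int)) (by omega) ⟨(m : Int), by ring⟩]
      congr 1
  have h30001 := key 14999
  have h1 : ((3:Int) + 2 * ((14999:Nat):Int)) = 30001 := by norm_num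
  rw [h1] at h30001
  rw [PySem.List.pyRange_of_pos 3 30000 (by norm_num : (0:Int) < 2)]
  have h2 : (if (3:Int) < 30000 then (((30000:Int) - 3 + 2 - 1) / 2).toNat else 0) = 14999 := by norm_num; rfl
  rw [h2]
  exact h30001

-- empty-separator join is concatenation
theorem pv_join_nil_eq_flatten (pieces : List (List Char)) :
    PySem.Chars.join [] pieces = pieces.flatten := by
  induction pieces with
  | nil => simp [PySem.Chars.join_nil]
  | cons p rest ih =>
    cases rest with
    | nil => simp [PySem.Chars.join_singleton]
    | cons q rest' =>
      rw [PySem.Chars.join_cons_cons, ih]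
      simp

-- the two full strings coincide
set_option maxRecDepth 8000 in
theorem pv_strings_eq :
    ("2357111317192329" : String).toList ++ pvTail (PySem.List.pyRange 31 30000 1) =
      ((pvPrimesBelow 30001).map pvChunk).flatten := by
  have hf : (PySem.List.pyRange 31 30000 1).filter pvIsPrimeA =
      (PySem.List.pyRange 31 30000 1).filter (fun x => decide (Nat.Prime x.toNat)) := by
    apply List.filter_congr
    intro i hi
    rw [PySem.List.mem_pyRange_one] at hi
    have h := pvIsPrimeA_iff i (by omega)
    by_cases hp : Nat.Prime i.toNat
    · have hh := h.mpr hp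
      simp [hh, hp]
    · have hh : pvIsPrimeA i = false := by
        rw [← Bool.not_eq_true]; exact fun hx => hp (h.mp hx)
      simp [hh, hp]
  have hsplit : pvPrimesBelow 30001 =
      pvPrimesBelow 31 ++ ((PySem.List.pyRange 31 30000 1).filter (fun x => decide (Nat.Prime x.toNat))
        ++ (PySem.List.pyRange 30000 30001 1).filter (fun x => decide (Nat.Prime x.toNat))) := by
    unfold pvPrimesBelow
    rw [← List.filter_append, ← List.filter_append]
    rw [← PySem.List.pyRange_one_append 31 30000 30001 (by omega) (by omega),
        ← PySem.List.pyRange_one_append 2 31 30001 (by omega) (by omega)]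
  have h30000 : (PySem.List.pyRange 30000 30001 1).filter (fun x => decide (Nat.Prime x.toNat)) = [] := by
    have hsing : PySem.List.pyRange 30000 30001 1 = [30000] := by
      have := PySem.List.pyRange_one_singleton (30000 : Int)
      norm_num at this ⊢
      exact this
    rw [hsing, List.filter_eq_nil_iff]
    intro a ha
    have : a = 30000 := by simpa using ha
    subst this
    simp only [decide_eq_true_eq, Int.reduceToNat]
    norm_num
  have hf31 : (PySem.List.pyRange 2 31 1).filter (fun x => decide (Nat.Prime x.toNat)) =
      (PySem.List.pyRange 2 31 1).filter pvIsPrimeA := by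
    apply List.filter_congr
    intro i hi
    rw [PySem.List.mem_pyRange_one] at hi
    have h := pvIsPrimeA_iff i (by omega)
    by_cases hp : Nat.Prime i.toNat
    · have hh := h.mpr hp
      simp [hh, hp]
    · have hh : pvIsPrimeA i = false := by
        rw [← Bool.not_eq_true]; exact fun hx => hp (h.mp hx)
      simp [hh, hp]
  have hPB31 : pvPrimesBelow 31 = [2, 3, 5, 7, 11, 13, 17, 19, 23, 29] := by
    rw [pvPrimesBelow, hf31]; decide
  have hseed : ("2357111317192329" : String).toList = ((pvPrimesBelow 31).map pvChunk).flatten := by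
    rw [hPB31]; decide
  rw [hsplit]
  rw [h30000]
  rw [List.append_nil]
  rw [List.map_append]
  rw [List.flatten_append]
  rw [← hseed]
  have ht : pvTail (PySem.List.pyRange 31 30000 1) =
      (((PySem.List.pyRange 31 30000 1).filter (fun x => decide (Nat.Prime x.toNat))).map pvChunk).flatten := by
    rw [pvTail, hf, List.flatMap_def]
  rw [ht]

-- ===== VERDICT (by name: the statement is the Claim_ definition above) =====
theorem answer_spec : Claim_equal_answer := by
  intro n _ hpre
  unfold Spec_answer
  rw [← String.toList_inj]
  rw [answer, pvGoA_eq n hpre]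
  show _ = (answer_alt n).toList
  unfold answer_alt
  simp only
  have hfold : ((PySem.List.pyRange 3 30000 2).foldl
      (fun ps i => if pvCheckB i ps then ps ++ [i] else ps) [2]) = pvPrimesBelow 30001 := pvFoldB_eq
  rw [hfold]
  rw [PySem.Str.toList_slice, PySem.Chars.slice_eq_listSlice, PySem.Str.toList_join]
  have hmm : (List.map String.toList ((pvPrimesBelow 30001).map PySem.Int.toStr)) =
      (pvPrimesBelow 30001).map pvChunk := by
    rw [List.map_map]; rfl
  have hsep : ("" : String).toList = ([] : List Char) := rfl
  rw [hmm, hsep, pv_join_nil_eq_flatten, ← pv_strings_eq]
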